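-- pv_equiv track=rewrite | github.com/YUYUJIN/codingStudy | programmers/12981.py | solution
-- ===== SOURCE A (Python) =====
-- def solution(n, words):
--     back=words[0][-1]
--     spokenword=[words[0]]
--     for i in range(1,len(words)):
--         isEnd=False
--         if back!=words[i][0]:
--             isEnd=True
--         elif words[i] in spokenword:
--             isEnd=True
--
--         if isEnd:
--             return [i%n+1,i//n+1]
--         else:
--             spokenword.append(words[i])
--             back=words[i][-1]
--     return [0,0]
-- ===== SOURCE B (Python) =====
-- def solution(n, words):
--     chain = None
--     for i, (prev, cur) in enumerate(zip(words, words[1:]), 1):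
--         if prev[-1] != cur[0]:
--             chain = i
--             break
--     dup = None
--     seen = set()
--     for i, w in enumerate(words):
--         if w in seen:
--             dup = i
--             break
--         seen.add(w)
--     cands = [i for i in (chain, dup) if i is not None]
--     if not cands:
--         return [0, 0]
--     i = min(cands)
--     return [i % n + 1, i // n + 1]
-- ===== Notes on version B (the rewrite author's own statement) =====
-- stated objective: alternative
-- what changed: B replaces A's single early-returning loop that maintains 'back' and a growing spokenword list with two independent passes - a zip(words, words[1:]) scan for the first chain break and a seen-set scan for the first repeated word - and returns the position of the minimum of the two candidate indices.
-- outside the precondition, e.g. on solution(2, ['ab', 'ba', 'ab', '']): A returns [1, 2], B raises IndexError; on solution(0, ['ab', 'bc']): A returns [0, 0], B returns [0, 0]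
import Mathlib
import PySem

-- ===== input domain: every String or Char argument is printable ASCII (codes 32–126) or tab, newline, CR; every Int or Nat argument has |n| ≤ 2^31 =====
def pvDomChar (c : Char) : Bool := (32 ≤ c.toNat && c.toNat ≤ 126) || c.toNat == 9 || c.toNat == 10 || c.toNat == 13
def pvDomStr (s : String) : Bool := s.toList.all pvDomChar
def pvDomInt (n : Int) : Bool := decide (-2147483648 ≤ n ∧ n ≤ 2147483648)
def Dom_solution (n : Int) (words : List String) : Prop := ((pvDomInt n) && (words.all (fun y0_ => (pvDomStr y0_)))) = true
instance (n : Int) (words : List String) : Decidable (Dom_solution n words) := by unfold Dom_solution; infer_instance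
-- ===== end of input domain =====

-- B re-decomposes A's single stateful early-returning loop into two independent scans
-- (first chain break via consecutive pairs, first repeated word via a seen-set) merged by min;
-- equal cost, alternative structure (return value only; neither mutates its arguments).

-- ===== PORT A =====
-- the for-loop of A: i is the Python index, back = last char of the previous word,
-- spoken = spokenword; '.getD ' '' totalises the char accesses Python makes (Pre_ keeps words nonempty)
def solLoopA (n : Int) : List String → Nat → Char → List String → List Int
  | [], _, _, _ => [0, 0]
  | w :: rest, i, back, spoken =>
      let isEnd :=
        if back ≠ (PySem.Str.pyGet? w 0).getD ' ' then true
        else if spoken.contains w then true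
        else false
      if isEnd then
        [PySem.Int.mod (Int.ofNat i) n + 1, PySem.Int.floordiv (Int.ofNat i) n + 1]
      else
        solLoopA n rest (i + 1) ((PySem.Str.pyGet? w (-1)).getD ' ') (spoken ++ [w])

def solution (n : Int) (words : List String) : List Int :=
  match words with
  | [] => []  -- Python A raises IndexError on words[0]; excluded by Pre_solution
  | w0 :: rest => solLoopA n rest 1 ((PySem.Str.pyGet? w0 (-1)).getD ' ') [w0]

-- ===== PORT B =====
-- first loop of Source B: enumerate(zip(words, words[1:]), 1), break at the first chain violation
def chainScanB : Nat → List (String × String) → Option Nat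
  | _, [] => none
  | i, (prev, cur) :: rest =>
      if (PySem.Str.pyGet? prev (-1)).getD ' ' ≠ (PySem.Str.pyGet? cur 0).getD ' ' then some i
      else chainScanB (i + 1) rest

-- second loop of Source B: seen-set scan, break at the first repeated word
def dupScanB : PySem.Set String → Nat → List String → Option Nat
  | _, _, [] => none
  | seen, i, w :: rest =>
      if PySem.Set.contains seen w then some i
      else dupScanB (PySem.Set.add seen w) (i + 1) rest

def solution_alt (n : Int) (words : List String) : List Int :=
  let chain := chainScanB 1 (List.zip words (words.drop 1))
  let dup := dupScanB PySem.Set.empty 0 words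
  let cands := List.filterMap id [chain, dup]
  match PySem.List.min? cands (fun x => x) with
  | none => [0, 0]
  | some i => [PySem.Int.mod (Int.ofNat i) n + 1, PySem.Int.floordiv (Int.ofNat i) n + 1]

-- ===== PRECONDITION & SPEC =====
-- Pre_ excludes the inputs on which Python A raises: an empty words list (IndexError on words[0]),
-- an empty-string word (IndexError on word[0]/word[-1] once the scan reaches it) and n = 0
-- (ZeroDivisionError when a violation exists). This slightly narrows A's domain: A still returns
-- when an empty-string word lies beyond the first violation (B's pair scan may reach it and raise)
-- and when n = 0 but no violation exists (both return [0,0]); see the cites.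
def Pre_solution (n : Int) (words : List String) : Prop :=
  words ≠ [] ∧ (∀ w ∈ words, w ≠ "") ∧ n ≠ 0
instance (n : Int) (words : List String) : Decidable (Pre_solution n words) := by
  unfold Pre_solution; infer_instance

def pvWitness_solution : Int × List String := (2, ["ab", "ba", "ac"])

def Spec_solution (n : Int) (words : List String) (out : List Int) : Prop := out = solution_alt n words
instance (n : Int) (words : List String) (out : List Int) : Decidable (Spec_solution n words out) := by unfold Spec_solution; infer_instance

-- ===== CLAIM (what is proved, stated in full; the proofs are below) =====
def Claim_equal_solution : Prop := ∀ (n : Int) (words : List String), Dom_solution n words → Pre_solution n words → Spec_solution n words (solution n words)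

-- ===== LEMMAS AND PROOFS =====

-- helpers for the proof only
def minO : Option Nat → Option Nat → Option Nat
  | none, b => b
  | some x, none => some x
  | some x, some y => some (min x y)

def outB (n : Int) : Option Nat → List Int
  | none => [0, 0]
  | some i => [PySem.Int.mod (Int.ofNat i) n + 1, PySem.Int.floordiv (Int.ofNat i) n + 1]

theorem min?_pair (c d : Option Nat) :
    PySem.List.min? (List.filterMap id [c, d]) (fun x => x) = minO c d := by
  cases c <;> cases d <;>
    simp [PySem.List.min?, minO, List.filterMap] <;>
    (split_ifs <;> simp <;> omega)

theorem chainScanB_ge (l : List (String × String)) : ∀ i j, chainScanB i l = some j → i ≤ j := by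
  induction l with
  | nil => intro i j h; simp [chainScanB] at h
  | cons p rest ih =>
      intro i j h
      obtain ⟨prev, cur⟩ := p
      simp only [chainScanB] at h
      split at h
      · exact Nat.le_of_eq (Option.some.inj h)
      · exact Nat.le_of_succ_le (ih (i + 1) j h)

theorem dupScanB_ge (l : List String) : ∀ s i j, dupScanB s i l = some j → i ≤ j := by
  induction l with
  | nil => intro s i j h; simp [dupScanB] at h
  | cons w rest ih =>
      intro s i j h
      simp only [dupScanB] at h
      split at h
      · exact Nat.le_of_eq (Option.some.inj h)
      · exact Nat.le_of_succ_le (ih _ (i + 1) j h)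

theorem contains_add_eq (seen : PySem.Set String) (spoken : List String) (w : String)
    (hc : ∀ x, PySem.Set.contains seen x = spoken.contains x) :
    ∀ x, PySem.Set.contains (PySem.Set.add seen w) x = (spoken ++ [w]).contains x := by
  intro x
  have hmemeq : (x ∈ seen) = (x ∈ spoken) := by
    have := hc x; simpa using this
  simp only [PySem.Set.add]
  by_cases hmem : PySem.Set.contains seen w = true
  · rw [if_pos hmem]
    have hsp : w ∈ spoken := by
      have := (hc w) ▸ hmem; simpa using this
    by_cases hxw : x = w
    · subst hxw
      simp only [PySem.Set.contains_eq_listContains]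
      simp [hmemeq, hsp]
    · simp only [PySem.Set.contains_eq_listContains]
      simp [hxw, hmemeq]
  · rw [if_neg hmem]
    simp only [PySem.Set.contains_eq_listContains]
    simp [hmemeq]

theorem loop_eq (n : Int) :
    ∀ (rest : List String) (i : Nat) (prev : String) (spoken : List String) (seen : PySem.Set String),
    (∀ x, PySem.Set.contains seen x = spoken.contains x) →
    solLoopA n rest i ((PySem.Str.pyGet? prev (-1)).getD ' ') spoken =
      outB n (minO (chainScanB i (List.zip (prev :: rest) rest)) (dupScanB seen i rest)) := by
  intro rest
  induction rest with
  | nil => intro i prev spoken seen _; simp [solLoopA, chainScanB, dupScanB, minO, outB]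
  | cons w rs ih =>
      intro i prev spoken seen hc
      rw [List.zip_cons_cons]
      have hsw : (w ∈ seen) = (w ∈ spoken) := by simpa using hc w
      by_cases hbeq : (PySem.List.pyGet? prev.toList (-1)).getD ' ' = (PySem.List.pyGet? w.toList 0).getD ' '
      · -- chain link holds between prev and w
        have hC : chainScanB i ((prev, w) :: List.zip (w :: rs) rs)
            = chainScanB (i + 1) (List.zip (w :: rs) rs) := by
          simp [chainScanB, PySem.Str.pyGet?, hbeq]
        by_cases hm : w ∈ spoken
        · -- duplicate at index i: A returns, B's dup scan yields some i
          have hA : solLoopA n (w :: rs) i ((PySem.Str.pyGet? prev (-1)).getD ' ') spoken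
              = [PySem.Int.mod (Int.ofNat i) n + 1, PySem.Int.floordiv (Int.ofNat i) n + 1] := by
            simp [solLoopA, PySem.Str.pyGet?, hbeq, hm]
          have hD : dupScanB seen i (w :: rs) = some i := by
            simp [dupScanB, hsw, hm]
          rw [hA, hC, hD]
          cases hch : chainScanB (i + 1) (List.zip (w :: rs) rs) with
          | none => simp [minO, outB]
          | some j =>
              have hj : i + 1 ≤ j := chainScanB_ge _ _ _ hch
              simp [minO, outB, Nat.min_eq_right (by omega : i ≤ j)]
        · -- no violation: both sides advance
          have hA : solLoopA n (w :: rs) i ((PySem.Str.pyGet? prev (-1)).getD ' ') spoken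
              = solLoopA n rs (i + 1) ((PySem.Str.pyGet? w (-1)).getD ' ') (spoken ++ [w]) := by
            simp [solLoopA, PySem.Str.pyGet?, hbeq, hm]
          have hD : dupScanB seen i (w :: rs) = dupScanB (PySem.Set.add seen w) (i + 1) rs := by
            simp [dupScanB, hsw, hm]
          rw [hA, hC, hD]
          exact ih (i + 1) w (spoken ++ [w]) (PySem.Set.add seen w)
            (contains_add_eq seen spoken w hc)
      · -- chain violation at index i: A returns here, B's pair scan yields some i
        have hA : solLoopA n (w :: rs) i ((PySem.Str.pyGet? prev (-1)).getD ' ') spoken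
            = [PySem.Int.mod (Int.ofNat i) n + 1, PySem.Int.floordiv (Int.ofNat i) n + 1] := by
          simp [solLoopA, PySem.Str.pyGet?, hbeq]
        have hC : chainScanB i ((prev, w) :: List.zip (w :: rs) rs) = some i := by
          simp [chainScanB, PySem.Str.pyGet?, hbeq]
        rw [hA, hC]
        cases hd : dupScanB seen i (w :: rs) with
        | none => simp [minO, outB]
        | some j =>
            have hj : i ≤ j := dupScanB_ge _ _ _ _ hd
            simp [minO, outB, Nat.min_eq_left hj]

theorem alt_eq (n : Int) (words : List String) :
    solution_alt n words =
      outB n (minO (chainScanB 1 (List.zip words (words.drop 1)))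
                   (dupScanB PySem.Set.empty 0 words)) := by
  unfold solution_alt
  simp only [min?_pair]
  cases h : minO (chainScanB 1 (List.zip words (words.drop 1))) (dupScanB PySem.Set.empty 0 words) <;>
    simp [outB]

-- ===== VERDICT (by name: the statement is the Claim_ definition above) =====
theorem solution_spec : Claim_equal_solution := by
  intro n words _hdom hpre
  have hne := hpre.1
  unfold Spec_solution
  cases words with
  | nil => exact absurd rfl hne
  | cons w0 rest =>
      rw [alt_eq]
      have hcont : ∀ x, PySem.Set.contains (PySem.Set.add PySem.Set.empty w0) x = List.contains [w0] x := by
        intro x; simp [PySem.Set.add, PySem.Set.empty]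
      have hdup : dupScanB PySem.Set.empty 0 (w0 :: rest)
          = dupScanB (PySem.Set.add PySem.Set.empty w0) 1 rest := by
        simp [dupScanB, PySem.Set.empty]
      simp only [List.drop_succ_cons, List.drop_zero, hdup]
      show solLoopA n rest 1 ((PySem.Str.pyGet? w0 (-1)).getD ' ') [w0] = _
      exact loop_eq n rest 1 w0 [w0] (PySem.Set.add PySem.Set.empty w0) hcont
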